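-- pv_equiv track=rewrite | github.com/janiskikans/advent-of-code-2019 | day_1_rocket_equation/day_1.py | calculate_required_fuel_plus_additional_fuel
-- ===== SOURCE A (Python) =====
-- import math
--
-- def calculate_required_fuel_for_module(mass):
--     return math.floor(mass / 3) - 2
--
-- def calculate_required_fuel_plus_additional_fuel(mass):
--     total_required_fuel = 0
--     required_fuel = calculate_required_fuel_for_module(mass)
--
--     while (1):
--         total_required_fuel += required_fuel
--         required_fuel = calculate_required_fuel_for_module(required_fuel)
--
--         if (required_fuel <= 0):
--             break
--
--     return(total_required_fuel)
-- ===== SOURCE B (Python) =====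
-- import math
--
-- def _additional(x):
--     nxt = math.floor(x / 3) - 2
--     if nxt <= 0:
--         return 0
--     return nxt + _additional(nxt)
--
-- def calculate_required_fuel_plus_additional_fuel(mass):
--     f0 = math.floor(mass / 3) - 2
--     return f0 + _additional(f0)
-- ===== Notes on version B (the rewrite author's own statement) =====
-- stated objective: simpler
-- what changed: Replaces A's while-True loop with mutable accumulator state by a direct recursion over the decreasing fuel value: f0 is added unconditionally and a helper adds each subsequent fuel amount only while it stays positive.
import Mathlib
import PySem

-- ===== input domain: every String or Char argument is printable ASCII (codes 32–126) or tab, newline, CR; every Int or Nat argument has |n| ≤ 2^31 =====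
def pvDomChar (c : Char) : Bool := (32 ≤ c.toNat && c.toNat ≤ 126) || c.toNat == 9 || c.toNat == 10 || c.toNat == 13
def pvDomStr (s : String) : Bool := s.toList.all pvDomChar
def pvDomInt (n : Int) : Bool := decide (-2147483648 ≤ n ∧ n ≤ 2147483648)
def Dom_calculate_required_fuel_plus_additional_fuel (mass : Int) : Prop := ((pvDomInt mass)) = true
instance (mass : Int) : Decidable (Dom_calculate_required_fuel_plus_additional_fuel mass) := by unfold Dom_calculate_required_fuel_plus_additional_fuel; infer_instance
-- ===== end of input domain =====

-- B replaces A's while-True loop with mutable accumulators by a direct recursion over the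
-- decreasing fuel value (simpler decomposition; same asymptotic cost).
-- Note: math.floor(mass / 3) equals floor division mass // 3 exactly for |mass| ≤ 2^31
-- (float division error is far below the distance to the next integer), so both ports use floordiv.
-- Both ports carry a Nat fuel parameter solely to make the recursion structural (total); the
-- fuel passed at the call sites is always sufficient, so it never changes the computed value.


-- ===== PORT A =====
def calculate_required_fuel_for_module (mass : Int) : Int :=
  PySem.Int.floordiv mass 3 - 2

-- A's `while (1): …` loop carrying (total_required_fuel, required_fuel); fuel only for totality
def fuelLoopA : Nat → Int → Int → Int
  | 0, total, _ => total
  | fuel + 1, total, required =>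
      let total' := total + required
      let required' := calculate_required_fuel_for_module required
      if required' ≤ 0 then total' else fuelLoopA fuel total' required'

def calculate_required_fuel_plus_additional_fuel (mass : Int) : Int :=
  let required := calculate_required_fuel_for_module mass
  fuelLoopA (required.toNat + 1) 0 required

-- ===== PORT B =====
-- B's helper: adds each subsequent fuel amount while it stays positive; fuel only for totality
def additionalFuel : Nat → Int → Int
  | 0, _ => 0
  | fuel + 1, x =>
      let nxt := PySem.Int.floordiv x 3 - 2
      if nxt ≤ 0 then 0 else nxt + additionalFuel fuel nxt

def calculate_required_fuel_plus_additional_fuel_alt (mass : Int) : Int :=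
  let f0 := PySem.Int.floordiv mass 3 - 2
  f0 + additionalFuel (f0.toNat + 1) f0

-- ===== PRECONDITION & SPEC =====
def Spec_calculate_required_fuel_plus_additional_fuel (mass : Int) (out : Int) : Prop := out = calculate_required_fuel_plus_additional_fuel_alt mass
instance (mass : Int) (out : Int) : Decidable (Spec_calculate_required_fuel_plus_additional_fuel mass out) := by unfold Spec_calculate_required_fuel_plus_additional_fuel; infer_instance

-- ===== CLAIM (what is proved, stated in full; the proofs are below) =====
def Claim_equal_calculate_required_fuel_plus_additional_fuel : Prop := ∀ (mass : Int), Dom_calculate_required_fuel_plus_additional_fuel mass → Spec_calculate_required_fuel_plus_additional_fuel mass (calculate_required_fuel_plus_additional_fuel mass)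

-- ===== LEMMAS AND PROOFS =====
theorem fuelLoopA_eq (fuel : Nat) (total required : Int) (h : required.toNat < fuel) :
    fuelLoopA fuel total required = total + required + additionalFuel fuel required := by
  induction fuel generalizing total required with
  | zero => omega
  | succ n ih =>
    have h3 : PySem.Int.floordiv required 3 = required / 3 :=
      PySem.Int.floordiv_eq_ediv_of_pos (by omega)
    simp only [fuelLoopA, additionalFuel, calculate_required_fuel_for_module, h3]
    split_ifs with hpos
    · omega
    · rw [ih (total + required) (required / 3 - 2) (by omega)]
      omega

-- ===== VERDICT (by name: the statement is the Claim_ definition above) =====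
theorem calculate_required_fuel_plus_additional_fuel_spec : Claim_equal_calculate_required_fuel_plus_additional_fuel := by
  intro mass _
  unfold Spec_calculate_required_fuel_plus_additional_fuel
  unfold calculate_required_fuel_plus_additional_fuel calculate_required_fuel_plus_additional_fuel_alt
  simp only [calculate_required_fuel_for_module]
  rw [fuelLoopA_eq _ _ _ (by omega)]
  omega
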